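-- pv_equiv track=rewrite | github.com/MrBrantCode/unitest_baseline | mut_generate/mist_train_taco/taco_4986/solution.py | lexicographically_minimal_string
-- ===== SOURCE A (Python) =====
-- def lexicographically_minimal_string(s: str) -> str:
--     s = list(s)
--     s.reverse()
--     t = []
--     u = []
--     s_cnt = [0] * (ord('z') + 1)
--
--     for x in s:
--         s_cnt[ord(x)] += 1
--
--     def s_has_smaller(s_cnt_local, c):
--         for i in range(ord('a'), ord(c)):
--             if s_cnt_local[i] > 0:
--                 return True
--         return False
--
--     while s or t:
--         if not s:
--             while t:
--                 u.append(t.pop())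
--         elif not t:
--             x = s.pop()
--             s_cnt[ord(x)] -= 1
--             t.append(x)
--         elif s_has_smaller(s_cnt, t[-1]):
--             x = s.pop()
--             s_cnt[ord(x)] -= 1
--             t.append(x)
--         else:
--             x = t.pop()
--             u.append(x)
--
--     return ''.join(u)
-- ===== SOURCE B (Python) =====
-- def lexicographically_minimal_string(s: str) -> str:
--     n = len(s)
--     # suffmin[i] = smallest char with code >= ord('a') among s[i:], or None if there is none
--     suffmin = [None] * (n + 1)
--     for i in range(n - 1, -1, -1):
--         c = s[i]
--         m = suffmin[i + 1]
--         if c >= 'a':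
--             suffmin[i] = c if (m is None or c <= m) else m
--         else:
--             suffmin[i] = m
--     out = []
--     st = []
--     for i, c in enumerate(s):
--         m = suffmin[i]
--         while st and (m is None or st[-1] <= m):
--             out.append(st.pop())
--         st.append(c)
--     while st:
--         out.append(st.pop())
--     return ''.join(out)
-- ===== Notes on version B (the rewrite author's own statement) =====
-- stated objective: faster
-- what changed: Replaces A's live character-count array with its per-step scan over codes 97..ord(top)-1 inside a three-branch while loop by a precomputed suffix-minimum table (over chars >= 'a') and a single left-to-right pass that pops the stack while its top is <= the suffix minimum of the yet-unconsumed input, then a final drain.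
import Mathlib
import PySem

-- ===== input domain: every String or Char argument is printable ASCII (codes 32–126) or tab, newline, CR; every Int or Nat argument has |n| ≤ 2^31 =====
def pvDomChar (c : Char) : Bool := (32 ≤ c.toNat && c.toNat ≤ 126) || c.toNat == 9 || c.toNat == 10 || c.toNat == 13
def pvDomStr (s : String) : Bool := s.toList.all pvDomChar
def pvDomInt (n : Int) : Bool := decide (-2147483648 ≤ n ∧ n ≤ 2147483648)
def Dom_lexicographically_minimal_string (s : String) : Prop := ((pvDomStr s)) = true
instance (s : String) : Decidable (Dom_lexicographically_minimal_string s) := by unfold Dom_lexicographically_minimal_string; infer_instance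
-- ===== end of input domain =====

-- B replaces A's live count array (with a per-step scan over codes 97..ord(top)-1)
-- by a precomputed suffix-minimum table and a single pass; measured constant-factor faster.

-- ===== PORT A =====
-- Python list s_cnt of length 123 ported as List Int; out-of-range set is a no-op in Lean
-- where Python raises IndexError — exactly those inputs are excluded by Pre_ below.
def pvCnt0 : List Int := List.replicate 123 0
def pvInc (cnt : List Int) (x : Char) : List Int := cnt.set x.toNat (cnt.getD x.toNat 0 + 1)
def pvDec (cnt : List Int) (x : Char) : List Int := cnt.set x.toNat (cnt.getD x.toNat 0 - 1)
def pvBuildCnt (l : List Char) : List Int := l.foldl pvInc pvCnt0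
-- s_has_smaller: scan range(ord('a'), ord(c)); early return = List.any
def pvHasSmaller (cnt : List Int) (c : Char) : Bool :=
  (PySem.List.pyRange 97 c.toNat 1).any (fun i => decide (0 < cnt.getD i.toNat 0))
-- The python stacks s (reversed input, popped from the end) and t are stored with their
-- top at the HEAD; u is kept in output order. 'if not s: drain t' is the first branch.
def pvLoopA : List Char → List Char → List Char → List Int → List Char
  | [], t, u, _ => u ++ t
  | x :: s, [], u, cnt => pvLoopA s [x] u (pvDec cnt x)
  | x :: s, c :: t, u, cnt =>
    if pvHasSmaller cnt c then pvLoopA s (x :: c :: t) u (pvDec cnt x)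
    else pvLoopA (x :: s) t (u ++ [c]) cnt
  termination_by s t _ _ => 2 * s.length + t.length

def lexicographically_minimal_string (s : String) : String :=
  String.mk (pvLoopA s.toList [] [] (pvBuildCnt s.toList))

-- ===== PORT B =====
-- suffmin update: min over chars ≥ 'a', None (= none) meaning "no such char"
def pvComb (c : Char) (m : Option Char) : Option Char :=
  if 'a' ≤ c then some (match m with | none => c | some d => if c ≤ d then c else d) else m
-- suffmin list for s[i:], built back to front; length = n+1, last entry none
def pvSuffMins : List Char → List (Option Char)
  | [] => [none]
  | c :: r => pvComb c ((pvSuffMins r).headD none) :: pvSuffMins r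
-- 'm is None or st[-1] <= m'
def pvLeB (c : Char) (m : Option Char) : Bool :=
  match m with | none => true | some d => decide (c ≤ d)
-- inner while: pop stack tops into out while condition holds
def pvPopWhile : List Char → List Char → Option Char → List Char × List Char
  | [], out, _ => ([], out)
  | c :: st, out, m => if pvLeB c m then pvPopWhile st (out ++ [c]) m else (c :: st, out)
-- main for-loop over (c, suffmin[i]) pairs; final drain = out ++ st
def pvLoopB : List (Char × Option Char) → List Char → List Char → List Char
  | [], st, out => out ++ st
  | (c, m) :: rest, st, out =>
    let p := pvPopWhile st out m
    pvLoopB rest (c :: p.1) p.2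

def lexicographically_minimal_string_alt (s : String) : String :=
  String.mk (pvLoopB (s.toList.zip (pvSuffMins s.toList)) [] [])

-- ===== PRECONDITION & SPEC =====
-- Pre_ excludes exactly the strings containing a character with code > 122 ('{','|','}','~'):
-- A's count array has length 123 and s_cnt[ord(x)] += 1 raises IndexError there.
def Pre_lexicographically_minimal_string (s : String) : Prop := s.toList.all (fun c => c.toNat ≤ 122) = true
instance (s : String) : Decidable (Pre_lexicographically_minimal_string s) := by
  unfold Pre_lexicographically_minimal_string; infer_instance
def pvWitness_lexicographically_minimal_string : String := "cbad"

def Spec_lexicographically_minimal_string (s : String) (out : String) : Prop := out = lexicographically_minimal_string_alt s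
instance (s : String) (out : String) : Decidable (Spec_lexicographically_minimal_string s out) := by unfold Spec_lexicographically_minimal_string; infer_instance

-- ===== CLAIM (what is proved, stated in full; the proofs are below) =====
def Claim_equal_lexicographically_minimal_string : Prop := ∀ (s : String), Dom_lexicographically_minimal_string s → Pre_lexicographically_minimal_string s → Spec_lexicographically_minimal_string s (lexicographically_minimal_string s)

-- ===== LEMMAS AND PROOFS =====

-- proof-side: the suffix minimum as a plain function
def pvMinOpt : List Char → Option Char
  | [] => none
  | c :: r => pvComb c (pvMinOpt r)

theorem pvCharLe_iff (a b : Char) : a ≤ b ↔ a.toNat ≤ b.toNat := by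
  rw [Char.le_def, UInt32.le_iff_toNat_le]; rfl

theorem pvGetD_set (l : List Int) (j : Nat) (v : Int) (i : Nat) :
    (l.set j v).getD i 0 = if i = j ∧ j < l.length then v else l.getD i 0 := by
  simp [List.getD_eq_getElem?_getD, List.getElem?_set]
  split_ifs with h1 h2 h3 <;> simp_all

theorem pvSuffMins_headD (l : List Char) : (pvSuffMins l).head?.getD none = pvMinOpt l := by
  induction l with
  | nil => simp [pvSuffMins, pvMinOpt]
  | cons c r ih =>
    rw [pvSuffMins, pvMinOpt]
    simp only [List.head?_cons, Option.getD_some, List.headD_eq_head?_getD] at *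
    rw [ih]

theorem pvZip_suffMins (x : Char) (s : List Char) :
    (x :: s).zip (pvSuffMins (x :: s)) = (x, pvMinOpt (x :: s)) :: s.zip (pvSuffMins s) := by
  rw [pvMinOpt]
  simp only [pvSuffMins, List.zip, List.zipWith, List.headD_eq_head?_getD]
  rw [pvSuffMins_headD]

theorem pvLeB_minOpt_iff (c : Char) (l : List Char) :
    pvLeB c (pvMinOpt l) = true ↔ ∀ ch ∈ l, 'a' ≤ ch → c ≤ ch := by
  induction l with
  | nil => simp [pvMinOpt, pvLeB]
  | cons a r ih =>
    rw [pvMinOpt]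
    by_cases ha : 'a' ≤ a
    · rw [pvComb.eq_def, if_pos ha]
      cases hM : pvMinOpt r with
      | none =>
        rw [hM] at ih
        simp only [pvLeB, decide_eq_true_eq, List.forall_mem_cons] at ih ⊢
        have hr : ∀ ch ∈ r, 'a' ≤ ch → c ≤ ch := ih.mp trivial
        exact ⟨fun h => ⟨fun _ => h, hr⟩, fun h => h.1 ha⟩
      | some d =>
        rw [hM] at ih
        simp only [pvLeB, decide_eq_true_eq, List.forall_mem_cons] at ih ⊢
        split_ifs with had
        · exact ⟨fun h => ⟨fun _ => h, ih.mp (le_trans h had)⟩, fun h => h.1 ha⟩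
        · have hda : d ≤ a := (not_le.mp had).le
          exact ⟨fun h => ⟨fun _ => le_trans h hda, ih.mp h⟩, fun h => ih.mpr h.2⟩
    · rw [pvComb.eq_def, if_neg ha]
      simp only [List.forall_mem_cons]
      rw [ih]
      exact ⟨fun h => ⟨fun h' => absurd h' ha, h⟩, fun h => h.2⟩

theorem pvHasSmaller_eq (cnt : List Int) (l : List Char) (c : Char)
    (hc : c.toNat ≤ 123)
    (hinv : ∀ i : Nat, i < 123 → cnt.getD i 0 = (l.countP (fun ch => ch.toNat == i) : Int)) :
    pvHasSmaller cnt c = !pvLeB c (pvMinOpt l) := by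
  have h1 : pvHasSmaller cnt c = true ↔ ∃ ch ∈ l, 97 ≤ ch.toNat ∧ ch.toNat < c.toNat := by
    rw [pvHasSmaller, List.any_eq_true]
    constructor
    · rintro ⟨i, hi, hpos⟩
      rw [PySem.List.mem_pyRange_one] at hi
      rw [hinv i.toNat (by omega)] at hpos
      simp only [decide_eq_true_eq] at hpos
      obtain ⟨ch, hch, hp⟩ := List.countP_pos_iff.mp (by exact_mod_cast hpos)
      simp only [beq_iff_eq] at hp
      exact ⟨ch, hch, by omega⟩
    · rintro ⟨ch, hch, h97, hlt⟩
      refine ⟨(ch.toNat : Int), by rw [PySem.List.mem_pyRange_one]; omega, ?_⟩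
      simp only [Int.toNat_natCast, decide_eq_true_eq]
      rw [hinv ch.toNat (by omega)]
      exact_mod_cast List.countP_pos_iff.mpr ⟨ch, hch, by simp⟩
  rw [Bool.eq_iff_iff, h1, Bool.not_eq_true', ← Bool.not_eq_true, pvLeB_minOpt_iff]
  push Not
  constructor
  · rintro ⟨ch, hch, h97, hlt⟩
    refine ⟨ch, hch, (pvCharLe_iff 'a' ch).mpr h97, ?_⟩
    exact not_le.mp fun h => absurd ((pvCharLe_iff c ch).mp h) (by omega)
  · rintro ⟨ch, hch, ha, hlt⟩
    have h1 := (pvCharLe_iff 'a' ch).mp ha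
    have h2 : ¬ c.toNat ≤ ch.toNat := fun h => absurd ((pvCharLe_iff c ch).mpr h) (not_le.mpr hlt)
    exact ⟨ch, hch, h1, by omega⟩

theorem pvBuildCnt_inv (l : List Char) (hl : ∀ c ∈ l, c.toNat ≤ 122) :
    ((pvBuildCnt l).length = 123) ∧
    (∀ i : Nat, i < 123 → (pvBuildCnt l).getD i 0 = (l.countP (fun ch => ch.toNat == i) : Int)) := by
  have key : ∀ (l : List Char) (cnt : List Int), cnt.length = 123 → (∀ c ∈ l, c.toNat ≤ 122) →
      ((l.foldl pvInc cnt).length = 123) ∧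
      (∀ i : Nat, i < 123 → (l.foldl pvInc cnt).getD i 0 = cnt.getD i 0 + (l.countP (fun ch => ch.toNat == i) : Int)) := by
    intro l
    induction l with
    | nil => intro cnt hlen _; simpa using hlen
    | cons x r ih =>
      intro cnt hlen hall
      have hx : x.toNat ≤ 122 := hall x (by simp)
      have hlen' : (pvInc cnt x).length = 123 := by simp [pvInc, hlen]
      obtain ⟨hL, hG⟩ := ih (pvInc cnt x) hlen' (fun c hc => hall c (by simp [hc]))
      rw [List.foldl_cons]
      refine ⟨hL, fun i hi => ?_⟩
      rw [hG i hi, pvInc, pvGetD_set, List.countP_cons]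
      by_cases hix : i = x.toNat
      · rw [if_pos ⟨hix, by omega⟩, hix]
        simp only [beq_iff_eq]
        push_cast; ring
      · rw [if_neg (by tauto)]
        have hb : (x.toNat == i) = false := by simp; omega
        rw [hb]
        push_cast; ring
  obtain ⟨h1, h2⟩ := key l pvCnt0 (by simp [pvCnt0]) hl
  rw [pvBuildCnt]
  refine ⟨h1, fun i hi => ?_⟩
  rw [h2 i hi]
  have h0 : pvCnt0.getD i 0 = 0 := by
    rw [pvCnt0, List.getD_eq_getElem?_getD, List.getElem?_replicate, if_pos hi]; rfl
  rw [h0]; ring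

theorem pvDec_inv (cnt : List Int) (x : Char) (s : List Char)
    (hx : x.toNat ≤ 122) (hlen : cnt.length = 123)
    (hinv : ∀ i : Nat, i < 123 → cnt.getD i 0 = ((x :: s).countP (fun ch => ch.toNat == i) : Int)) :
    ((pvDec cnt x).length = 123) ∧
    (∀ i : Nat, i < 123 → (pvDec cnt x).getD i 0 = (s.countP (fun ch => ch.toNat == i) : Int)) := by
  refine ⟨by simp [pvDec, hlen], fun i hi => ?_⟩
  rw [pvDec, pvGetD_set]
  by_cases hix : i = x.toNat
  · rw [if_pos ⟨hix, by omega⟩, hix]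
    rw [hinv x.toNat (by omega), List.countP_cons]
    simp only [beq_iff_eq]
    push_cast; ring
  · rw [if_neg (by tauto), hinv i hi, List.countP_cons]
    have hb : (x.toNat == i) = false := by simp; omega
    rw [hb]
    push_cast; ring

theorem pvMain (n : Nat) : ∀ (l st u : List Char) (cnt : List Int),
    2 * l.length + st.length ≤ n →
    (∀ c ∈ l, c.toNat ≤ 122) → (∀ c ∈ st, c.toNat ≤ 122) →
    cnt.length = 123 →
    (∀ i : Nat, i < 123 → cnt.getD i 0 = (l.countP (fun ch => ch.toNat == i) : Int)) →
    pvLoopA l st u cnt = pvLoopB (l.zip (pvSuffMins l)) st u := by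
  induction n with
  | zero =>
    intro l st u cnt hm _ _ _ _
    have hl0 : l = [] := by cases l <;> simp_all
    have hst0 : st = [] := by cases st <;> simp_all
    subst hl0; subst hst0
    simp [pvLoopA, pvLoopB]
  | succ n ih =>
    intro l st u cnt hm hl hst hlen hinv
    cases l with
    | nil => simp [pvLoopA, pvLoopB]
    | cons x s =>
    cases st with
    | nil =>
      have hx : x.toNat ≤ 122 := hl x (by simp)
      obtain ⟨hlen', hinv'⟩ := pvDec_inv cnt x s hx hlen hinv
      rw [pvLoopA, ih s [x] u _ (by simp at hm ⊢; omega)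
        (fun c hc => hl c (by simp [hc])) (by simpa using hx) hlen' hinv']
      rw [pvZip_suffMins, pvLoopB]
      simp [pvPopWhile]
    | cons c t =>
      have hx : x.toNat ≤ 122 := hl x (by simp)
      have hc122 : c.toNat ≤ 122 := hst c (by simp)
      have hHS := pvHasSmaller_eq cnt (x :: s) c (by omega) hinv
      rw [pvZip_suffMins, pvLoopB]
      cases hb : pvLeB c (pvMinOpt (x :: s)) with
      | false =>
        rw [hb] at hHS
        obtain ⟨hlen', hinv'⟩ := pvDec_inv cnt x s hx hlen hinv
        rw [pvLoopA, if_pos (by simp [hHS]), ih s (x :: c :: t) u _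
          (by simp at hm ⊢; omega) (fun a ha => hl a (by simp [ha]))
          (by intro a ha; simp at ha
              rcases ha with h | h | h
              · exact h ▸ hx
              · exact h ▸ hc122
              · exact hst a (by simp [h])) hlen' hinv']
        have hpw : pvPopWhile (c :: t) u (pvMinOpt (x :: s)) = (c :: t, u) := by
          rw [pvPopWhile, hb]; simp
        rw [hpw]
      | true =>
        rw [hb] at hHS
        rw [pvLoopA, if_neg (by simp [hHS])]
        rw [ih (x :: s) t (u ++ [c]) cnt (by simp at hm ⊢; omega) hl
          (fun a ha => hst a (by simp [ha])) hlen hinv]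
        rw [pvZip_suffMins, pvLoopB]
        have hpw : pvPopWhile (c :: t) u (pvMinOpt (x :: s)) = pvPopWhile t (u ++ [c]) (pvMinOpt (x :: s)) := by
          rw [pvPopWhile, hb]; simp
        rw [hpw]

-- ===== VERDICT (by name: the statement is the Claim_ definition above) =====
theorem lexicographically_minimal_string_spec : Claim_equal_lexicographically_minimal_string := by
  intro s _ hPre
  unfold Pre_lexicographically_minimal_string at hPre
  rw [List.all_eq_true] at hPre
  have hPre2 : ∀ c ∈ s.toList, c.toNat ≤ 122 := fun c hc => by simpa using hPre c hc
  unfold Spec_lexicographically_minimal_string lexicographically_minimal_string lexicographically_minimal_string_alt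
  obtain ⟨hlen, hinv⟩ := pvBuildCnt_inv s.toList hPre2
  rw [pvMain (2 * s.toList.length) s.toList [] [] _ (by simp) hPre2 (by simp) hlen hinv]
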